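-- pv_equiv track=rewrite | github.com/zlfben/trace2tap | iot-tap-backend/autotap/util.py | find_time_clips
-- ===== SOURCE A (Python) =====
-- def find_time_clips(time_list, span):
--     """
--     given a time_list, find time clips that cover all of them
--     """
--     holding_starting_time = None
--     current_time = None
--     time_clips = []
--
--     for time in time_list:
--         if holding_starting_time is None:
--             holding_starting_time = time - span
--             current_time = time
--         else:
--             if time > current_time + span:
--                 time_clips.append((holding_starting_time, current_time + span))
--                 holding_starting_time = time - span
--                 current_time = time
--             else:
--                 current_time = time
--
--     if holding_starting_time is not None:
--         time_clips.append((holding_starting_time, current_time + span))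
--
--     return time_clips
-- ===== SOURCE B (Python) =====
-- def find_time_clips(time_list, span):
--     # Boundary extraction: each adjacent pair with a gap > span marks a clip end and the next clip start;
--     # zip the start boundaries with the end boundaries instead of scanning with running state.
--     if not time_list:
--         return []
--     gaps = [(a, b) for a, b in zip(time_list, time_list[1:]) if b - a > span]
--     starts = [time_list[0]] + [b for _, b in gaps]
--     ends = [a for a, _ in gaps] + [time_list[-1]]
--     return [(s - span, e + span) for s, e in zip(starts, ends)]
-- ===== Notes on version B (the rewrite author's own statement) =====
-- stated objective: alternative
-- what changed: Replaces A's stateful single-pass accumulator with boundary extraction: filter the adjacent-pair zip for gaps > span, then zip the start boundaries (first element plus each post-gap element) with the end boundaries (each pre-gap element plus the last) into clips.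
import Mathlib
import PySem

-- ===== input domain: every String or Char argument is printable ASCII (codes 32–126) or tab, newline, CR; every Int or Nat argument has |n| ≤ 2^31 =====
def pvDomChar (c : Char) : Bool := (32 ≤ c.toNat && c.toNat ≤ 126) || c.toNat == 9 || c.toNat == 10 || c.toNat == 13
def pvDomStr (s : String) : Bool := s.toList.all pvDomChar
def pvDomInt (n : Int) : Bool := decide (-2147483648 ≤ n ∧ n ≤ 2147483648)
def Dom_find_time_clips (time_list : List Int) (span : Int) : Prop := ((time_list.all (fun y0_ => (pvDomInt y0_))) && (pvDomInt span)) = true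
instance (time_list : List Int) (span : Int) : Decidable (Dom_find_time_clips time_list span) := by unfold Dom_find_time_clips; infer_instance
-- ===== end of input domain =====

-- B replaces A's stateful accumulator loop with boundary extraction (filter the
-- adjacent-pair zip for gaps, zip start boundaries with end boundaries); same cost, different algorithm.


-- ===== PORT A =====
-- one loop step of A: state = (holding_starting_time, current_time, time_clips)
def ftc_step (span : Int) (st : Option Int × Option Int × List (Int × Int)) (time : Int) :
    Option Int × Option Int × List (Int × Int) :=
  match st with
  | (none, _, clips) => (some (time - span), some time, clips)
  | (some h, some c, clips) =>
      if time > c + span then (some (time - span), some time, clips ++ [(h, c + span)])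
      else (some h, some time, clips)
  | (some h, none, clips) => (some h, some time, clips)  -- unreachable in A

def find_time_clips (time_list : List Int) (span : Int) : List (Int × Int) :=
  match time_list.foldl (ftc_step span) (none, none, []) with
  | (some h, some c, clips) => clips ++ [(h, c + span)]
  | (some _, none, clips) => clips  -- unreachable in A
  | (none, _, clips) => clips

-- ===== PORT B =====
-- gaps = [(a, b) for a, b in zip(time_list, time_list[1:]) if b - a > span]
-- (the slice time_list[1:] is exactly List.tail on any list)
def ftc_gaps (span : Int) (l : List Int) : List (Int × Int) :=
  (l.zip l.tail).filter (fun p => decide (p.2 - p.1 > span))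

def find_time_clips_alt (time_list : List Int) (span : Int) : List (Int × Int) :=
  if time_list = [] then []
  else
    -- time_list[0] / time_list[-1]: the list is nonempty here, so headD/getLastD are exact
    let g := ftc_gaps span time_list
    let starts := time_list.headD 0 :: g.map Prod.snd
    let ends := g.map Prod.fst ++ [time_list.getLastD 0]
    (starts.zip ends).map (fun p => (p.1 - span, p.2 + span))

-- ===== PRECONDITION & SPEC =====
def Spec_find_time_clips (time_list : List Int) (span : Int) (out : List (Int × Int)) : Prop := out = find_time_clips_alt time_list span
instance (time_list : List Int) (span : Int) (out : List (Int × Int)) : Decidable (Spec_find_time_clips time_list span out) := by unfold Spec_find_time_clips; infer_instance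

-- ===== CLAIM (what is proved, stated in full; the proofs are below) =====
def Claim_equal_find_time_clips : Prop := ∀ (time_list : List Int) (span : Int), Dom_find_time_clips time_list span → Spec_find_time_clips time_list span (find_time_clips time_list span)

-- ===== LEMMAS AND PROOFS =====

-- the remaining output of A's loop from state (h - span, c): proof-only recursive characterisation
def ftcAux (span h c : Int) : List Int → List (Int × Int)
  | [] => [(h - span, c + span)]
  | x :: xs => if x > c + span then (h - span, c + span) :: ftcAux span x x xs else ftcAux span h x xs

-- A's fold from a live state produces the already-emitted clips followed by ftcAux
lemma ftc_foldA (span : Int) (l : List Int) :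
    ∀ (h c : Int) (clips : List (Int × Int)),
      (match l.foldl (ftc_step span) (some (h - span), some c, clips) with
       | (some h', some c', cl) => cl ++ [(h', c' + span)]
       | (some _, none, cl) => cl
       | (none, _, cl) => cl) = clips ++ ftcAux span h c l := by
  induction l with
  | nil => intro h c clips; simp [ftcAux]
  | cons x xs ih =>
      intro h c clips
      simp only [List.foldl_cons, ftc_step, ftcAux]
      by_cases hgt : x > c + span
      · simp only [hgt, if_pos]
        rw [ih x x (clips ++ [(h - span, c + span)])]
        simp
      · simp only [hgt, if_neg, ite_false]
        exact ih h x clips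

-- ftcAux equals B's boundary-extraction expression over the chain c :: l
lemma ftc_auxEq (span : Int) (l : List Int) :
    ∀ (h c : Int),
      ftcAux span h c l =
        ((h :: (ftc_gaps span (c :: l)).map Prod.snd).zip
          ((ftc_gaps span (c :: l)).map Prod.fst ++ [(c :: l).getLastD 0])).map
          (fun p => (p.1 - span, p.2 + span)) := by
  induction l with
  | nil => intro h c; simp [ftcAux, ftc_gaps]
  | cons x xs ih =>
      intro h c
      by_cases hgt : x > c + span
      · have hg : ftc_gaps span (c :: x :: xs) = (c, x) :: ftc_gaps span (x :: xs) := by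
          simp only [ftc_gaps, List.tail_cons, List.zip_cons_cons, List.filter_cons]
          simp [show x - c > span by omega]
        rw [show ftcAux span h c (x :: xs) = (h - span, c + span) :: ftcAux span x x xs by
              simp [ftcAux, hgt]]
        rw [hg, ih x x]
        simp
      · have hg : ftc_gaps span (c :: x :: xs) = ftc_gaps span (x :: xs) := by
          simp only [ftc_gaps, List.tail_cons, List.zip_cons_cons, List.filter_cons]
          simp [show ¬ (x - c > span) by omega]
        rw [show ftcAux span h c (x :: xs) = ftcAux span h x xs by simp [ftcAux, hgt]]
        rw [hg, ih h x]
        simp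

-- ===== VERDICT (by name: the statement is the Claim_ definition above) =====
theorem find_time_clips_spec : Claim_equal_find_time_clips := by
  intro time_list span _
  unfold Spec_find_time_clips find_time_clips find_time_clips_alt
  cases time_list with
  | nil => simp
  | cons t l =>
      simp only [List.foldl_cons, ftc_step, reduceCtorEq, List.headD_cons]
      rw [ftc_foldA span l t t []]
      rw [ftc_auxEq span l t t]
      simp
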